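/- GENERATED by farm/mkstatement.py from design/units.tsv (unit `get_window`) and the Specs of Vorbis/Spec/*.lean — do not edit.
   THE STATEMENT of the proof unit `get_window`: the function `get_window` (26 instructions) satisfies its contract,
   given the contracts of its callees. What the names mean: Vorbis/Spec/Basic.lean. The theorem to prove:
   `theorem get_window_ok : Vorbis.Spec.get_window.Statement`. -/
import Vorbis.Spec.Mdct
namespace Vorbis.Spec.get_window
open X86 X86.User Asan

/-- The statement of unit `get_window`. -/
def Statement : Prop :=
  ∀ (Lay : Layout) (_hLay : Lay.hi = 0x1000000) (μ : Microarch) (_hμ : UserX.MicroOK μ) (u₀ : State)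
    (_hcode : HasCodeNat Lay u₀ Vorbis.L.get_window.entry Vorbis.Code.code_get_window.nat Vorbis.L.get_window.size)
    (_h_asan_load4_noabort : Asan.SmallCheck Lay μ Vorbis.WayInv (Vorbis.CodeOK u₀) [.rax, .rcx, .rdx] 4 Vorbis.L.__asan_load4_noabort.entry)
    (_h_asan_load8_noabort : Asan.SmallCheck Lay μ Vorbis.WayInv (Vorbis.CodeOK u₀) [.rax, .rcx, .rdx] 8 Vorbis.L.__asan_load8_noabort.entry),
    ∀ (others : List Obj) (frames : List (Nat × FrameLayout)), Calls Lay μ Vorbis.WayInv (Vorbis.conv u₀) Vorbis.L.get_window.entry (Vorbis.Spec.get_window.spec others frames)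

end Vorbis.Spec.get_window
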